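-- pv_equiv track=rewrite | github.com/ms1011/Algorithm | 프로그래머스/1/77884. 약수의 개수와 덧셈/약수의 개수와 덧셈.py | yaksu
-- ===== SOURCE A (Python) =====
-- def yaksu(n):
--     nums = []
--     for i in range(1, n+1):
--         if n % i == 0:
--             nums.append(i)
--     if len(nums) % 2 == 0:
--         return n
--     else:
--         return -n
-- ===== SOURCE B (Python) =====
-- def yaksu(n):
--     # n has an odd number of divisors iff n is a perfect square,
--     # so find the least i >= 1 with i*i >= n and test i*i == n.
--     i = 1
--     while i * i < n:
--         i += 1
--     return -n if i * i == n else n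
-- ===== Notes on version B (the rewrite author's own statement) =====
-- stated objective: faster
-- what changed: Instead of scanning all i in 1..n and counting divisors, B finds the least i with i*i >= n by a loop and uses the fact that the divisor count is odd exactly for perfect squares, returning -n iff i*i == n.
import Mathlib
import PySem

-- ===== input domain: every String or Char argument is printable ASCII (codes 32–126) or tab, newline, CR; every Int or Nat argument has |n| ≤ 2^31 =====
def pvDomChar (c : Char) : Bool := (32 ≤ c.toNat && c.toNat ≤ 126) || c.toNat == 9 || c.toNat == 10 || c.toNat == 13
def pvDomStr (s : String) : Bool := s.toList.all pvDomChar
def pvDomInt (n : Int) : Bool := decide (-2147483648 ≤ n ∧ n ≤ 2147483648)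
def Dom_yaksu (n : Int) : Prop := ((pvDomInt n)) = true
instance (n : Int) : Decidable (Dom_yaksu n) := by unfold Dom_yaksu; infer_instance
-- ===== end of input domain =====

-- B replaces A's O(n) divisor-count scan by an O(sqrt n) search for the least i with i*i ≥ n
-- (the divisor count is odd exactly for perfect squares).

-- ===== PORT A =====
def yaksu (n : Int) : Int :=
  let nums := (PySem.List.pyRange 1 (n+1) 1).foldl
    (fun acc i => if PySem.Int.mod n i == 0 then acc ++ [i] else acc) ([] : List Int)
  if nums.length % 2 == 0 then n else -n

-- ===== PORT B =====
-- 'while i * i < n: i += 1' starting from i = 1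
def yaksuAltLoop (n : Int) (i : Nat) : Nat :=
  if (i : Int) * i < n then yaksuAltLoop n (i + 1) else i
termination_by n.toNat + 1 - i
decreasing_by
  have hii : (i : Int) ≤ (i : Int) * i := by nlinarith [Int.natCast_nonneg i]
  omega

def yaksu_alt (n : Int) : Int :=
  let i := yaksuAltLoop n 1
  if (i : Int) * i = n then -n else n

-- ===== PRECONDITION & SPEC =====
def Spec_yaksu (n : Int) (out : Int) : Prop := out = yaksu_alt n
instance (n : Int) (out : Int) : Decidable (Spec_yaksu n out) := by unfold Spec_yaksu; infer_instance

-- ===== CLAIM (what is proved, stated in full; the proofs are below) =====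
def Claim_equal_yaksu : Prop := ∀ (n : Int), Dom_yaksu n → Spec_yaksu n (yaksu n)

-- ===== LEMMAS AND PROOFS =====

-- B's loop: starting at i, if every j in [1,i) has j*j < n, the result r is the least index
-- with n ≤ r*r (and everything below r squares below n).
theorem yaksuAltLoop_spec (n : Int) (i : Nat) (h1 : 1 ≤ i)
    (h2 : ∀ j : Nat, 1 ≤ j → j < i → (j : Int) * j < n) :
    i ≤ yaksuAltLoop n i ∧ n ≤ (yaksuAltLoop n i : Int) * (yaksuAltLoop n i) ∧
      ∀ j : Nat, 1 ≤ j → j < yaksuAltLoop n i → (j : Int) * j < n := by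
  revert h1 h2
  induction i using yaksuAltLoop.induct (n := n) with
  | case1 i hlt ih =>
    intro h1 h2
    rw [yaksuAltLoop, if_pos hlt]
    have := ih (by omega) (by
      intro j hj1 hj2
      rcases Nat.lt_or_ge j i with h | h
      · exact h2 j hj1 h
      · have hji : j = i := by omega
        simpa [hji] using hlt)
    exact ⟨by omega, this.2.1, this.2.2⟩
  | case2 i hlt =>
    intro h1 h2
    rw [yaksuAltLoop, if_neg hlt]
    exact ⟨le_refl _, by omega, h2⟩

-- divisor-count parity: |divisors N| = 2·(small divisors) + (1 if square else 0)
theorem card_divisors_parity (N : ℕ) (hN : 1 ≤ N) :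
    Odd N.divisors.card ↔ IsSquare N := by
  set S := N.divisors with hS
  have hN0 : N ≠ 0 := by omega
  -- pair each small divisor d (d*d < N) with the large divisor N/d
  have hbij : (S.filter (fun d => d * d < N)).card = (S.filter (fun d => N < d * d)).card := by
    apply Finset.card_bij (fun d _ => N / d)
    · intro d hd
      simp only [Finset.mem_filter, hS, Nat.mem_divisors] at hd ⊢
      obtain ⟨⟨hdvd, _⟩, hlt⟩ := hd
      have hdpos : 0 < d := Nat.pos_of_dvd_of_pos hdvd (by omega)
      have hmul : d * (N / d) = N := Nat.mul_div_cancel' hdvd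
      have hdlt : d < N / d := by nlinarith
      refine ⟨⟨Nat.div_dvd_of_dvd hdvd, hN0⟩, by nlinarith⟩
    · intro d hd e he hde
      simp only [Finset.mem_filter, hS, Nat.mem_divisors] at hd he
      rw [← Nat.div_div_self hd.1.1 hN0, ← Nat.div_div_self he.1.1 hN0, hde]
    · intro e he
      simp only [Finset.mem_filter, hS, Nat.mem_divisors] at he
      obtain ⟨⟨hdvd, _⟩, hgt⟩ := he
      have hepos : 0 < e := Nat.pos_of_dvd_of_pos hdvd (by omega)
      have hmul : e * (N / e) = N := Nat.mul_div_cancel' hdvd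
      have hdpos : 0 < N / e := Nat.div_pos (Nat.le_of_dvd (by omega) hdvd) hepos
      refine ⟨N / e, ?_, Nat.div_div_self hdvd hN0⟩
      simp only [Finset.mem_filter, hS, Nat.mem_divisors]
      have hlt : N / e < e := by nlinarith
      exact ⟨⟨Nat.div_dvd_of_dvd hdvd, hN0⟩, by nlinarith⟩
  -- the middle class d*d = N has card 1 iff N is a square, else 0
  have hmid : (S.filter (fun d => d * d = N)).card = (if IsSquare N then 1 else 0) := by
    split_ifs with hsq
    · obtain ⟨k, hk⟩ := hsq
      have hkpos : 0 < k := by nlinarith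
      rw [Finset.card_eq_one]
      refine ⟨k, ?_⟩
      ext d
      simp only [Finset.mem_filter, hS, Nat.mem_divisors, Finset.mem_singleton]
      constructor
      · rintro ⟨-, hd⟩
        exact Nat.mul_self_inj.mp (hd.trans hk)
      · rintro rfl
        exact ⟨⟨⟨_, hk⟩, hN0⟩, hk.symm⟩
    · rw [Finset.card_eq_zero]
      ext d
      simp only [Finset.mem_filter, hS, Nat.mem_divisors, Finset.notMem_empty, iff_false]
      rintro ⟨-, hd⟩
      exact hsq ⟨d, hd.symm⟩
  -- partition S into the three classes
  have e1 : (S.filter (fun d => ¬ d * d < N)).filter (fun d => d * d = N)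
      = S.filter (fun d => d * d = N) := by
    ext d
    simp only [Finset.mem_filter]
    constructor
    · rintro ⟨⟨h, -⟩, h2⟩; exact ⟨h, h2⟩
    · rintro ⟨h, h2⟩; exact ⟨⟨h, by omega⟩, h2⟩
  have e2 : (S.filter (fun d => ¬ d * d < N)).filter (fun d => ¬ d * d = N)
      = S.filter (fun d => N < d * d) := by
    ext d
    simp only [Finset.mem_filter]
    constructor
    · rintro ⟨⟨h, h1⟩, h2⟩; exact ⟨h, by omega⟩
    · rintro ⟨h, h2⟩; exact ⟨⟨h, by omega⟩, by omega⟩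
  have h1 := Finset.card_filter_add_card_filter_not (s := S) (p := fun d => d * d < N)
  have h2 := Finset.card_filter_add_card_filter_not
    (s := S.filter (fun d => ¬ d * d < N)) (p := fun d => d * d = N)
  rw [e1, e2] at h2
  have h1' : (S.filter (fun d => d * d < N)).card
      + (S.filter (fun d => ¬ d * d < N)).card = S.card := h1
  have h2' : (S.filter (fun d => d * d = N)).card
      + (S.filter (fun d => N < d * d)).card
      = (S.filter (fun d => ¬ d * d < N)).card := h2
  rw [Nat.odd_iff]
  by_cases hsq : IsSquare N
  · simp only [if_pos hsq] at hmid
    refine ⟨fun _ => hsq, fun _ => ?_⟩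
    omega
  · simp only [if_neg hsq] at hmid
    exact ⟨fun hodd => absurd rfl (by omega : ¬ (0 : ℕ) = 0), fun h => absurd h hsq⟩

-- A's list of divisors has length = card of Nat.divisors
theorem yaksu_count (n : Int) (hn : 1 ≤ n) :
    ((PySem.List.pyRange 1 (n+1) 1).foldl
      (fun acc i => if PySem.Int.mod n i == 0 then acc ++ [i] else acc) ([] : List Int)).length
      = n.toNat.divisors.card := by
  rw [PySem.List.foldl_append_if_eq_filter, List.nil_append, PySem.List.pyRange_one]
  have h1 : (n + 1 - 1) = n := by ring
  rw [h1, List.filter_map, List.length_map, ← List.countP_eq_length_filter]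
  have hN : ((n.toNat : Int)) = n := Int.toNat_of_nonneg (by omega)
  rw [List.countP_congr (q := fun k => decide ((k + 1) ∣ n.toNat)) ?hpq]
  case hpq =>
    intro k hk
    simp only [Function.comp]
    have : (1 + (k : Int)) ∣ n ↔ (k + 1) ∣ n.toNat := by
      conv_lhs => rw [show (1 + (k : Int)) = ((k + 1 : ℕ) : Int) by push_cast; ring, ← hN]
      exact Int.natCast_dvd_natCast
    simp [PySem.Int.mod_eq_zero_iff_dvd, this]
  have hcf : (List.range n.toNat).countP (fun k => decide ((k + 1) ∣ n.toNat))
      = ((Finset.range n.toNat).filter (fun k => (k + 1) ∣ n.toNat)).card := by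
    rw [List.countP_eq_length_filter]; rfl
  rw [hcf]
  apply Finset.card_bij (fun k _ => k + 1)
  · intro k hk
    simp only [Finset.mem_filter, Finset.mem_range] at hk
    exact Nat.mem_divisors.mpr ⟨hk.2, by omega⟩
  · intro a ha b hb hab
    omega
  · intro d hd
    obtain ⟨hdvd, hne⟩ := Nat.mem_divisors.mp hd
    have hd1 : 1 ≤ d := Nat.pos_of_dvd_of_pos hdvd (by omega)
    have hdN : d ≤ n.toNat := Nat.le_of_dvd (by omega) hdvd
    refine ⟨d - 1, ?_, by omega⟩
    simp only [Finset.mem_filter, Finset.mem_range]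
    constructor
    · omega
    · have hr : d - 1 + 1 = d := by omega
      rw [hr]; exact hdvd

-- the two ports agree on every integer
theorem yaksu_eq (n : Int) : yaksu n = yaksu_alt n := by
  by_cases hn : 1 ≤ n
  · have hcnt := yaksu_count n hn
    have hloop := yaksuAltLoop_spec n 1 (le_refl 1) (by intro j h1 h2; omega)
    have hpar := card_divisors_parity n.toNat (by omega)
    have hN : ((n.toNat : Int)) = n := Int.toNat_of_nonneg (by omega)
    have hiff : ((yaksuAltLoop n 1 : Int) * (yaksuAltLoop n 1) = n) ↔ IsSquare n.toNat := by
      constructor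
      · intro h
        refine ⟨yaksuAltLoop n 1, ?_⟩
        have hcast : ((yaksuAltLoop n 1 * yaksuAltLoop n 1 : ℕ) : Int) = n := by
          push_cast; linarith
        omega
      · rintro ⟨k, hk⟩
        have hn1 : 1 ≤ n.toNat := by omega
        have hk1 : 1 ≤ k := by nlinarith
        have hkInt : (k : Int) * k = n := by
          rw [← hN]; exact_mod_cast hk.symm
        have hrk : yaksuAltLoop n 1 ≤ k := by
          by_contra h
          push Not at h
          have := hloop.2.2 k hk1 h
          omega
        have h1 : ((yaksuAltLoop n 1 : ℕ) : Int) ≤ (k : Int) := by exact_mod_cast hrk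
        nlinarith [hloop.2.1]
    simp only [yaksu, yaksu_alt, hcnt]
    by_cases hsq : IsSquare n.toNat
    · have hodd := Nat.odd_iff.mp (hpar.mpr hsq)
      rw [if_pos (hiff.mpr hsq)]
      simp [hodd]
    · have hev : n.toNat.divisors.card % 2 = 0 := by
        have := hpar
        rw [Nat.odd_iff] at this
        simp only [hsq, iff_false] at this
        omega
      rw [if_neg (fun h => hsq (hiff.mp h))]
      simp [hev]
  · push Not at hn
    have hloop1 : yaksuAltLoop n 1 = 1 := by
      rw [yaksuAltLoop, if_neg (by push_cast; omega)]
    simp only [yaksu, yaksu_alt, hloop1,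
      PySem.List.pyRange_one_eq_nil (by omega : (n + 1 : Int) ≤ 1)]
    simp
    intro h
    omega

-- ===== VERDICT (by name: the statement is the Claim_ definition above) =====
theorem yaksu_spec : Claim_equal_yaksu := by
  intro n _
  unfold Spec_yaksu
  exact yaksu_eq n
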